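-- pv_equiv track=rewrite | github.com/feliciatrinh/coding-challenges-and-review | microsoft/largest_m_aligned_subset.py | largest_subset_best
-- ===== SOURCE A (Python) =====
-- def largest_subset_best(A, M):
--     """
--     Runtime: O(N), Space complexity: O(M)
--     """
--     if not A or M <= 0:
--         return 0
--
--     remainder_to_count = dict()
--     max_count = 0
--     for coord in A:
--         remainder = coord % M
--         if remainder not in remainder_to_count:
--             remainder_to_count[remainder] = 1
--         else:
--             remainder_to_count[remainder] += 1
--         max_count = max(max_count, remainder_to_count[remainder])
--     return max_count
-- ===== SOURCE B (Python) =====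
-- def largest_subset_best(A, M):
--     """Sort the remainders, then one scan finds the longest run (= max frequency)."""
--     if not A or M <= 0:
--         return 0
--     rems = sorted(coord % M for coord in A)
--     best = 0
--     run = 0
--     prev = None
--     for r in rems:
--         if r == prev:
--             run += 1
--         else:
--             prev = r
--             run = 1
--         best = max(best, run)
--     return best
-- ===== Notes on version B (the rewrite author's own statement) =====
-- stated objective: alternative
-- what changed: Replaces the hash-table remainder counter with sort-then-scan: sort the remainders and take the longest run of equal values in one pass.
import Mathlib
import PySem

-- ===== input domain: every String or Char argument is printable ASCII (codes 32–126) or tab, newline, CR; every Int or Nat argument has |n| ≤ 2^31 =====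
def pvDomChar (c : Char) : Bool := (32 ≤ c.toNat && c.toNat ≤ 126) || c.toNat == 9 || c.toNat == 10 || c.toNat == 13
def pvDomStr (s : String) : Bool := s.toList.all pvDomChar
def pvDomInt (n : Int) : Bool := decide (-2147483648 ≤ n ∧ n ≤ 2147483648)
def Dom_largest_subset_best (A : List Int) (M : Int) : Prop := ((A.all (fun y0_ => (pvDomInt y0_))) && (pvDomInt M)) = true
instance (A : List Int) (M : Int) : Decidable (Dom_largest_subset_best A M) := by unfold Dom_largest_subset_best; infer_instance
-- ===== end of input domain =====

-- B replaces A's hash-table remainder counter by sort-then-scan (longest run of equal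
-- sorted remainders); same result, a genuinely different algorithm of similar cost.


-- ===== PORT A =====
def stepA (M : Int) (st : PySem.Dict Int Int × Int) (coord : Int) : PySem.Dict Int Int × Int :=
  let remainder := PySem.Int.mod coord M
  let d := if st.1.contains remainder = false
           then st.1.insert remainder 1
           else st.1.insert remainder (st.1.getD remainder 0 + 1)
  (d, max st.2 (d.getD remainder 0))

def largest_subset_best (A : List Int) (M : Int) : Int :=
  if A.isEmpty || decide (M ≤ 0) then 0
  else (A.foldl (stepA M) (PySem.Dict.empty, 0)).2

-- ===== PORT B =====
def lsbScan : List Int → Option Int → Int → Int → Int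
  | [], _, _, best => best
  | r :: rest, prev, run, best =>
    if prev == some r then lsbScan rest prev (run + 1) (max best (run + 1))
    else lsbScan rest (some r) 1 (max best 1)

def largest_subset_best_alt (A : List Int) (M : Int) : Int :=
  if A.isEmpty || decide (M ≤ 0) then 0
  else
    let rems := PySem.List.sorted (A.map (fun coord => PySem.Int.mod coord M)) (fun x => x) false
    lsbScan rems none 0 0

-- ===== PRECONDITION & SPEC =====
def Spec_largest_subset_best (A : List Int) (M : Int) (out : Int) : Prop := out = largest_subset_best_alt A M
instance (A : List Int) (M : Int) (out : Int) : Decidable (Spec_largest_subset_best A M out) := by unfold Spec_largest_subset_best; infer_instance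

-- ===== CLAIM (what is proved, stated in full; the proofs are below) =====
def Claim_equal_largest_subset_best : Prop := ∀ (A : List Int) (M : Int), Dom_largest_subset_best A M → Spec_largest_subset_best A M (largest_subset_best A M)

-- ===== LEMMAS AND PROOFS =====

/-- maximal multiplicity of an element of `l` (0 for `[]`). -/
def maxMult : List Int → Int
  | [] => 0
  | x :: t => max ((x :: t).count x : Int) (maxMult t)

lemma maxMult_cons (x : Int) (t : List Int) :
    maxMult (x :: t) = max ((x :: t).count x : Int) (maxMult t) := rfl

lemma count_le_maxMult (l : List Int) (y : Int) (hy : y ∈ l) : (l.count y : Int) ≤ maxMult l := by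
  induction l with
  | nil => simp at hy
  | cons x t ih =>
    rw [maxMult_cons]
    by_cases h : y = x
    · subst h; omega
    · have hyt : y ∈ t := by
        rcases List.mem_cons.mp hy with h' | h'
        · exact absurd h' h
        · exact h'
      have h1 := ih hyt
      have hc : (x :: t).count y = t.count y := by
        simp [Ne.symm h]
      omega

lemma maxMult_nonneg (l : List Int) : 0 ≤ maxMult l := by
  induction l with
  | nil => simp [maxMult]
  | cons x t ih => rw [maxMult_cons]; omega

lemma maxMult_le (l : List Int) (n : Int) (h : ∀ y ∈ l, (l.count y : Int) ≤ n) (hn : 0 ≤ n) :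
    maxMult l ≤ n := by
  induction l with
  | nil => simpa [maxMult]
  | cons x t ih =>
    have h1 : ((x :: t).count x : Int) ≤ n := h x (List.mem_cons_self ..)
    have h2 : maxMult t ≤ n := by
      refine ih (fun y hy => ?_)
      have h3 := h y (List.mem_cons_of_mem _ hy)
      have hc : t.count y ≤ (x :: t).count y := List.count_le_count_cons ..
      omega
    rw [maxMult_cons]; omega

lemma maxMult_eq_of_count_eq (l l' : List Int)
    (h : ∀ y, l.count y = l'.count y) : maxMult l = maxMult l' := by
  have hmem : ∀ y, y ∈ l ↔ y ∈ l' := by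
    intro y
    rw [← List.count_pos_iff, ← List.count_pos_iff, h]
  refine le_antisymm ?_ ?_
  · exact maxMult_le _ _ (fun y hy => by rw [h]; exact count_le_maxMult _ _ ((hmem y).mp hy))
      (maxMult_nonneg _)
  · exact maxMult_le _ _ (fun y hy => by rw [← h]; exact count_le_maxMult _ _ ((hmem y).mpr hy))
      (maxMult_nonneg _)

lemma maxMult_append_singleton (p : List Int) (r : Int) :
    maxMult (p ++ [r]) = max (maxMult p) ((p.count r : Int) + 1) := by
  refine le_antisymm ?_ ?_
  · refine maxMult_le _ _ (fun y hy => ?_) ?_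
    · by_cases h : y = r
      · subst h
        have hc : (p ++ [y]).count y = p.count y + 1 := by simp
        omega
      · have hc0 : List.count y [r] = 0 := List.count_eq_zero.mpr (by simp [h])
        have hc : (p ++ [r]).count y = p.count y := by simp [List.count_append, hc0]
        have hyp : y ∈ p := by
          rcases List.mem_append.mp hy with h' | h'
          · exact h'
          · simp at h'; exact absurd h' h
        have h1 := count_le_maxMult p y hyp
        omega
    · have := maxMult_nonneg p; omega
  · have h1 : maxMult p ≤ maxMult (p ++ [r]) := by
      refine maxMult_le _ _ (fun y hy => ?_) (maxMult_nonneg _)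
      have hc : p.count y ≤ (p ++ [r]).count y := by simp
      have h2 := count_le_maxMult (p ++ [r]) y (List.mem_append.mpr (Or.inl hy))
      omega
    have hc : (p ++ [r]).count r = p.count r + 1 := by simp
    have h2 := count_le_maxMult (p ++ [r]) r (List.mem_append.mpr (Or.inr (by simp)))
    omega

-- ---- A side: the fold computes maxMult of the processed remainders ----

lemma stepA_eq (M : Int) (d : PySem.Dict Int Int) (mc coord : Int) :
    stepA M (d, mc) coord
    = (d.insert (PySem.Int.mod coord M) (d.getD (PySem.Int.mod coord M) 0 + 1),
       max mc (d.getD (PySem.Int.mod coord M) 0 + 1)) := by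
  by_cases hc : d.contains (PySem.Int.mod coord M) = false
  · have h0 : d.getD (PySem.Int.mod coord M) 0 = 0 :=
      PySem.Dict.getD_of_not_contains d 0 hc
    simp [stepA, hc, h0]
  · simp [stepA, hc]

lemma loopA_inv (M : Int) (rest p : List Int) (d : PySem.Dict Int Int) (mc : Int)
    (hd : ∀ r, d.getD r 0 = ((p.map (fun c => PySem.Int.mod c M)).count r : Int))
    (hmc : mc = maxMult (p.map (fun c => PySem.Int.mod c M))) :
    (rest.foldl (stepA M) (d, mc)).2
    = maxMult ((p ++ rest).map (fun c => PySem.Int.mod c M)) := by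
  induction rest generalizing p d mc with
  | nil => simpa using hmc
  | cons x t ih =>
    rw [List.foldl_cons, stepA_eq]
    have hmap : (p ++ [x]).map (fun c => PySem.Int.mod c M)
        = p.map (fun c => PySem.Int.mod c M) ++ [PySem.Int.mod x M] := by simp
    have hstep := ih (p ++ [x])
      (d.insert (PySem.Int.mod x M) (d.getD (PySem.Int.mod x M) 0 + 1))
      (max mc (d.getD (PySem.Int.mod x M) 0 + 1))
      (by
        intro r'
        rw [PySem.Dict.getD_insert, hmap]
        by_cases h : r' = PySem.Int.mod x M
        · simp [h, hd (PySem.Int.mod x M), List.count_append]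
        · have hc0 : List.count r' [PySem.Int.mod x M] = 0 :=
            List.count_eq_zero.mpr (by simp [h])
          simp [h, hd r', List.count_append, hc0])
      (by rw [hmc, hd (PySem.Int.mod x M), hmap, maxMult_append_singleton])
    rw [hstep]
    simp

-- ---- B side: the run scan computes maxMult of a sorted list ----

lemma lsbScan_cons (r : Int) (rest : List Int) (prev : Option Int) (run best : Int) :
    lsbScan (r :: rest) prev run best
    = if prev == some r then lsbScan rest prev (run + 1) (max best (run + 1))
      else lsbScan rest (some r) 1 (max best 1) := rfl

lemma mem_le_getLast (p : List Int) (v y : Int) (hp : p.Pairwise (· ≤ ·))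
    (hl : p.getLast? = some v) (hy : y ∈ p) : y ≤ v := by
  induction p with
  | nil => simp at hy
  | cons x t ih =>
    cases t with
    | nil =>
      simp at hl hy; omega
    | cons z u =>
      have hl' : (z :: u).getLast? = some v := by
        simpa [List.getLast?_cons_cons] using hl
      rcases List.mem_cons.mp hy with h | h
      · have hxz : ∀ w ∈ z :: u, x ≤ w := (List.pairwise_cons.mp hp).1
        have hv : v ∈ z :: u := List.mem_of_getLast? hl'
        have := hxz v hv
        omega
      · exact ih (List.pairwise_cons.mp hp).2 hl' h

lemma lsbScan_inv (s p : List Int) (prev : Option Int) (run best : Int)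
    (hs : (p ++ s).Pairwise (· ≤ ·))
    (hbest : best = maxMult p)
    (hpr : (prev = none ∧ p = [] ∧ run = 0) ∨
           (∃ v, prev = some v ∧ p.getLast? = some v ∧ run = (p.count v : Int))) :
    lsbScan s prev run best = maxMult (p ++ s) := by
  induction s generalizing p prev run best with
  | nil => simpa using hbest
  | cons x t ih =>
    have hs' : ((p ++ [x]) ++ t).Pairwise (· ≤ ·) := by simpa using hs
    have hlast : (p ++ [x]).getLast? = some x := by simp
    rw [lsbScan_cons]
    by_cases hb : prev == some x
    · -- run continues: prev = some x
      rw [if_pos hb]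
      have hpv : prev = some x := by
        cases prev <;> simp_all
      rcases hpr with ⟨h1, _, _⟩ | ⟨v, hv1, hv2, hv3⟩
      · rw [h1] at hpv; exact absurd hpv (by simp)
      · have hvx : v = x := by rw [hpv] at hv1; injection hv1.symm
        rw [hvx] at hv3
        rw [ih (p ++ [x]) prev (run + 1) (max best (run + 1)) hs'
          (by rw [maxMult_append_singleton, hbest, hv3])
          (Or.inr ⟨x, hpv, hlast, by simp [hv3]⟩)]
        simp
    · -- new run: x does not occur in p
      rw [if_neg hb]
      have hnotin : x ∉ p := by
        intro hx
        rcases hpr with ⟨_, h2, _⟩ | ⟨v, hv1, hv2, _⟩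
        · rw [h2] at hx; simp at hx
        · have hple : x ≤ v := mem_le_getLast p v x
            (List.Pairwise.sublist (List.sublist_append_left p (x :: t)) hs) hv2 hx
          have hvp : v ∈ p := List.mem_of_getLast? hv2
          have hvx : v ≤ x :=
            (List.pairwise_append.mp hs).2.2 v hvp x (by simp)
          have heq : v = x := by omega
          rw [hv1, heq] at hb; simp at hb
      have hcnt0 : p.count x = 0 := List.count_eq_zero.mpr hnotin
      rw [ih (p ++ [x]) (some x) 1 (max best 1) hs'
        (by rw [maxMult_append_singleton, hbest, hcnt0]; simp)
        (Or.inr ⟨x, rfl, hlast, by simp [hcnt0]⟩)]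
      simp

-- ===== VERDICT (by name: the statement is the Claim_ definition above) =====
theorem largest_subset_best_spec : Claim_equal_largest_subset_best := by
  intro A M _
  unfold Spec_largest_subset_best largest_subset_best largest_subset_best_alt
  by_cases hg : (A.isEmpty || decide (M ≤ 0)) = true
  · simp [hg]
  · rw [if_neg hg, if_neg hg]
    set l := A.map (fun c => PySem.Int.mod c M) with hl
    have ha : (A.foldl (stepA M) (PySem.Dict.empty, 0)).2 = maxMult l := by
      have := loopA_inv M A [] PySem.Dict.empty 0 (by simp) (by simp [maxMult])
      simpa using this
    set s := PySem.List.sorted l (fun x => x) false with hsdef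
    have hperm : s.Perm l := PySem.List.sorted_perm l (fun x => x) false
    have hb : lsbScan s none 0 0 = maxMult s := by
      have := lsbScan_inv s [] none 0 0
        (by simpa using PySem.List.sorted_pairwise l (fun x => x))
        (by simp [maxMult]) (Or.inl ⟨rfl, rfl, rfl⟩)
      simpa using this
    rw [ha, hb, maxMult_eq_of_count_eq s l (fun y => hperm.count_eq y)]
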